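-- pv_equiv track=rewrite | github.com/Maxim5867/ModuleTwo | hot.py | Podskazka
-- ===== SOURCE A (Python) =====
-- def Podskazka(chislo_games,chislo_komp):
--     if chislo_games ==chislo_komp:
--         return 'Вы угадали!'
--     podskazka = []
--     for i in range(len(chislo_games)):
--         if chislo_games[i] == chislo_komp[i]:
--             podskazka.append('Горячо')
--         elif chislo_games[i] in chislo_komp:
--             podskazka.append('Тепло')
--
--
--     if len(podskazka) == 0:
--         return 'холодно'
--
--     podskazka.sort()
--     return ' '.join(podskazka)
-- ===== SOURCE B (Python) =====
-- def Podskazka(chislo_games, chislo_komp):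
--     if chislo_games == chislo_komp:
--         return 'Вы угадали!'
--     komp_chars = set(chislo_komp)
--     pairs = list(zip(chislo_games, chislo_komp))
--     hot = sum(1 for a, b in pairs if a == b)
--     warm = sum(1 for a, b in pairs if a != b and a in komp_chars)
--     if hot == 0 and warm == 0:
--         return 'холодно'
--     return ' '.join(['Горячо'] * hot + ['Тепло'] * warm)
-- ===== Notes on version B (the rewrite author's own statement) =====
-- stated objective: alternative
-- what changed: B replaces A's index loop with an if/elif chain appending label strings and a final sort by two staged comprehension passes over the zipped character pairs (hot = count of equal pairs, warm = count of unequal pairs whose character is in a precomputed set of the computer's string), then builds the grouped answer directly by replication — no indexing, no label list, no sort.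
import Mathlib
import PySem

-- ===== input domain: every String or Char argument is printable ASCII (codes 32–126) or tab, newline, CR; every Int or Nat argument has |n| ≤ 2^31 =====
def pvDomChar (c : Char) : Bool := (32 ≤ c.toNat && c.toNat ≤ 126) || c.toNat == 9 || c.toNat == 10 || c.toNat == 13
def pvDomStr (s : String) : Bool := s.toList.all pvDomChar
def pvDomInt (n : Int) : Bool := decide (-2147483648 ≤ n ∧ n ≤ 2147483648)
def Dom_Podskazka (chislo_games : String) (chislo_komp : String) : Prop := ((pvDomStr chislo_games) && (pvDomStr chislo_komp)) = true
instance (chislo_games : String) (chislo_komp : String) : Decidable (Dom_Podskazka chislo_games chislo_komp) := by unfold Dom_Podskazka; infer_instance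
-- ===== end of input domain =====

-- B replaces A's index loop collecting label strings and sorting them with two staged counting
-- passes over the zipped character pairs against a set of the computer's characters, building the
-- grouped answer by replication (objective: alternative).

-- ===== PORT A =====
-- loop body of A: compare chars at index i, append the label
def pvStepA (gs ks : List Char) (acc : List String) (i : Nat) : List String :=
  if gs[i]?.getD ' ' = ks[i]?.getD ' ' then acc ++ ["Горячо"]
  else if gs[i]?.getD ' ' ∈ ks then acc ++ ["Тепло"]
  else acc

def Podskazka (chislo_games : String) (chislo_komp : String) : String :=
  if chislo_games = chislo_komp then "Вы угадали!"
  else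
    let gs := chislo_games.toList
    let ks := chislo_komp.toList
    let podskazka := (List.range gs.length).foldl (pvStepA gs ks) []
    if podskazka.length = 0 then "холодно"
    else PySem.Str.join " " (PySem.List.sorted podskazka (fun x => x) false)

-- ===== PORT B =====
def Podskazka_alt (chislo_games : String) (chislo_komp : String) : String :=
  if chislo_games = chislo_komp then "Вы угадали!"
  else
    let kset := PySem.Set.ofList chislo_komp.toList
    let pairs := chislo_games.toList.zip chislo_komp.toList
    let hot := pairs.countP (fun p => p.1 == p.2)
    let warm := pairs.countP (fun p => p.1 != p.2 && PySem.Set.contains kset p.1)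
    if hot = 0 ∧ warm = 0 then "холодно"
    else PySem.Str.join " " (List.replicate hot "Горячо" ++ List.replicate warm "Тепло")

-- ===== PRECONDITION & SPEC =====
-- Pre_ excludes exactly the inputs where Python A raises IndexError: unequal strings with
-- len(chislo_games) > len(chislo_komp) (chislo_komp[i] is out of range there).
def Pre_Podskazka (chislo_games : String) (chislo_komp : String) : Prop :=
  chislo_games = chislo_komp ∨ chislo_games.toList.length ≤ chislo_komp.toList.length
instance (chislo_games : String) (chislo_komp : String) : Decidable (Pre_Podskazka chislo_games chislo_komp) := by unfold Pre_Podskazka; infer_instance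

def pvWitness_Podskazka : String × String := ("123", "321")

def Spec_Podskazka (chislo_games : String) (chislo_komp : String) (out : String) : Prop := out = Podskazka_alt chislo_games chislo_komp
instance (chislo_games : String) (chislo_komp : String) (out : String) : Decidable (Spec_Podskazka chislo_games chislo_komp out) := by unfold Spec_Podskazka; infer_instance

-- ===== CLAIM (what is proved, stated in full; the proofs are below) =====
def Claim_equal_Podskazka : Prop := ∀ (chislo_games : String) (chislo_komp : String), Dom_Podskazka chislo_games chislo_komp → Pre_Podskazka chislo_games chislo_komp → Spec_Podskazka chislo_games chislo_komp (Podskazka chislo_games chislo_komp)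

-- ===== LEMMAS AND PROOFS =====

theorem stepA_eq (gs ks : List Char) (acc : List String) (i : Nat) :
    pvStepA gs ks acc i = acc ++ pvStepA gs ks [] i := by
  unfold pvStepA; split_ifs <;> simp

theorem foldA_append (gs ks : List Char) (idxs : List Nat) :
    ∀ acc, idxs.foldl (pvStepA gs ks) acc = acc ++ idxs.foldl (pvStepA gs ks) [] := by
  induction idxs with
  | nil => simp
  | cons j u ihu =>
    intro acc
    simp only [List.foldl_cons]
    rw [ihu (pvStepA gs ks acc j), stepA_eq, ihu (pvStepA gs ks [] j), List.append_assoc]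

theorem foldA_flatMap (gs ks : List Char) (idxs : List Nat) :
    idxs.foldl (pvStepA gs ks) [] = idxs.flatMap (fun i => pvStepA gs ks [] i) := by
  induction idxs with
  | nil => simp
  | cons i t ih =>
    simp only [List.foldl_cons, List.flatMap_cons, ← ih]
    rw [foldA_append gs ks t (pvStepA gs ks [] i), stepA_eq gs ks [] i]

theorem count_flatMap (f : Nat → List String) (c : String) (idxs : List Nat) :
    (idxs.flatMap f).count c = ((idxs.map (fun i => (f i).count c)).sum) := by
  induction idxs with
  | nil => simp
  | cons i t ih => simp [List.count_append, ih]

theorem countP_sum {a : Type} (p : a → Bool) (l : List a) :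
    l.countP p = (l.map (fun x => if p x then (1 : Nat) else 0)).sum := by
  induction l with
  | nil => simp
  | cons x t ih => by_cases h : p x <;> simp [h, ih]; omega

theorem perm_two : ∀ (l : List String), (∀ x ∈ l, x = "Горячо" ∨ x = "Тепло") →
    (List.replicate (l.count "Горячо") "Горячо" ++ List.replicate (l.count "Тепло") "Тепло").Perm l := by
  intro l
  induction l with
  | nil => simp
  | cons x t ih =>
    intro hm
    have ht := ih (fun y hy => hm y (List.mem_cons_of_mem _ hy))
    rcases hm x (List.mem_cons_self) with rfl | rfl
    · rw [List.count_cons_self, List.count_cons_of_ne (by decide)]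
      exact (List.Perm.cons _ ht)
    · rw [List.count_cons_self, List.count_cons_of_ne (by decide), List.replicate_succ]
      exact List.perm_middle.trans (List.Perm.cons _ ht)

theorem pairwise_two (a b : Nat) :
    (List.replicate a "Горячо" ++ List.replicate b "Тепло").Pairwise (fun x y => x ≤ y) := by
  apply List.pairwise_append.2
  refine ⟨List.pairwise_replicate.2 (Or.inr (le_refl _)), List.pairwise_replicate.2 (Or.inr (le_refl _)), ?_⟩
  intro x hx y hy
  rw [List.eq_of_mem_replicate hx, List.eq_of_mem_replicate hy]
  exact le_of_lt (String.lt_iff_toList_lt.mpr (by decide))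

theorem length_counts : ∀ (l : List String), (∀ x ∈ l, x = "Горячо" ∨ x = "Тепло") →
    l.length = l.count "Горячо" + l.count "Тепло" := by
  intro l
  induction l with
  | nil => simp
  | cons x t ih =>
    intro hm
    have ht := ih (fun y hy => hm y (List.mem_cons_of_mem _ hy))
    rcases hm x (List.mem_cons_self) with rfl | rfl <;>
      simp [ht] <;> omega

theorem memA (gs ks : List Char) (idxs : List Nat) :
    ∀ x ∈ idxs.foldl (pvStepA gs ks) [], x = "Горячо" ∨ x = "Тепло" := by
  intro x hx
  rw [foldA_flatMap] at hx
  rcases List.mem_flatMap.1 hx with ⟨i, _, hx⟩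
  unfold pvStepA at hx; split_ifs at hx <;> simp_all

-- counts of the single-step list at an in-range index
theorem countA_hot (gs ks : List Char) (i : Nat) (hi : i < gs.length) (hik : i < ks.length) :
    (pvStepA gs ks [] i).count "Горячо" = if gs[i] = ks[i] then 1 else 0 := by
  unfold pvStepA
  rw [List.getElem?_eq_getElem hi, List.getElem?_eq_getElem hik]
  simp only [Option.getD_some]
  split_ifs <;> simp_all

theorem countA_warm (gs ks : List Char) (i : Nat) (hi : i < gs.length) (hik : i < ks.length) :
    (pvStepA gs ks [] i).count "Тепло" =
      if gs[i] = ks[i] then 0 else if gs[i] ∈ ks then 1 else 0 := by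
  unfold pvStepA
  rw [List.getElem?_eq_getElem hi, List.getElem?_eq_getElem hik]
  simp only [Option.getD_some]
  split_ifs <;> simp_all

-- ===== VERDICT (by name: the statement is the Claim_ definition above) =====
theorem Podskazka_spec : Claim_equal_Podskazka := by
  intro g k _ hpre
  unfold Spec_Podskazka Podskazka Podskazka_alt
  by_cases hgk : g = k
  · simp [hgk]
  · simp only [if_neg hgk]
    have hlen : g.toList.length ≤ k.toList.length := by
      rcases hpre with h | h
      · exact absurd h hgk
      · exact h
    set gs := g.toList
    set ks := k.toList
    set l := (List.range gs.length).foldl (pvStepA gs ks) [] with hl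
    have hmem : ∀ x ∈ l, x = "Горячо" ∨ x = "Тепло" := memA gs ks (List.range gs.length)
    -- relate B's tally to the counts of A's label list
    have hzlen : (gs.zip ks).length = gs.length := by
      simp [List.length_zip]; omega
    have hmap_hot :
        (gs.zip ks).map (fun p => if (p.1 == p.2) then (1 : Nat) else 0) =
        (List.range gs.length).map (fun i => (pvStepA gs ks [] i).count "Горячо") := by
      apply List.ext_getElem
      · simp [hzlen]
      · intro i h1 h2
        have hig : i < gs.length := by simpa using h2
        have hik : i < ks.length := by simp at h2; omega
        simp only [List.getElem_map, List.getElem_zip, List.getElem_range]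
        rw [countA_hot gs ks i hig hik]
        by_cases h : gs[i] = ks[i] <;> simp [h]
    have hmap_warm :
        (gs.zip ks).map (fun p => if (p.1 != p.2 && PySem.Set.contains (PySem.Set.ofList ks) p.1)
            then (1 : Nat) else 0) =
        (List.range gs.length).map (fun i => (pvStepA gs ks [] i).count "Тепло") := by
      apply List.ext_getElem
      · simp [hzlen]
      · intro i h1 h2
        have hig : i < gs.length := by simpa using h2
        have hik : i < ks.length := by simp at h2; omega
        simp only [List.getElem_map, List.getElem_zip, List.getElem_range]
        rw [countA_warm gs ks i hig hik]
        by_cases h : gs[i] = ks[i] <;>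
          by_cases hm : gs[i] ∈ ks <;>
          simp [h, hm, PySem.Set.contains, PySem.Set.mem_ofList]
    have hhot : (gs.zip ks).countP (fun p => p.1 == p.2) = l.count "Горячо" := by
      rw [countP_sum, hmap_hot, hl, foldA_flatMap, count_flatMap]
    have hwarm : (gs.zip ks).countP
        (fun p => p.1 != p.2 && PySem.Set.contains (PySem.Set.ofList ks) p.1) = l.count "Тепло" := by
      rw [countP_sum, hmap_warm, hl, foldA_flatMap, count_flatMap]
    simp only [hhot, hwarm]
    have hlc := length_counts l hmem
    by_cases hz : l.length = 0
    · rw [if_pos hz, if_pos (by constructor <;> omega)]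
    · rw [if_neg hz, if_neg (by rintro ⟨h1, h2⟩; omega)]
      congr 1
      exact PySem.List.sorted_id_eq_of_perm_of_pairwise _ _ (perm_two l hmem) (pairwise_two _ _)
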